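-- pv_equiv track=rewrite | github.com/suppresseddev/UF_Programming_V3 | Intro to Programming/Project2/P2_B.py | count_runs
-- ===== SOURCE A (Python) =====
-- def count_runs(flat_data):
--     k = 1
--     #keeps track to make sure no RLE is greater than 15
--     j = 1
--     for i, rl in enumerate(flat_data):
--         if i == len(flat_data) - 1:
--             break
--         if rl != flat_data[i+1]:
--             k += 1
--         else:
--             j += 1
--         if j == 15:
--             k += 1
--             j = 1
--     return k
-- ===== SOURCE B (Python) =====
-- def count_runs(flat_data):
--     pairs = list(zip(flat_data, flat_data[1:]))
--     d = sum(1 for a, b in pairs if a != b)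
--     e = sum(1 for a, b in pairs if a == b)
--     return 1 + d + e // 14
-- ===== Notes on version B (the rewrite author's own statement) =====
-- stated objective: simpler
-- what changed: Replaced A's stateful loop with running counters k and j (j wrapping at 15) by one pass over adjacent pairs counting differing pairs d and equal pairs e, returning the closed form 1 + d + e // 14.
import Mathlib
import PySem

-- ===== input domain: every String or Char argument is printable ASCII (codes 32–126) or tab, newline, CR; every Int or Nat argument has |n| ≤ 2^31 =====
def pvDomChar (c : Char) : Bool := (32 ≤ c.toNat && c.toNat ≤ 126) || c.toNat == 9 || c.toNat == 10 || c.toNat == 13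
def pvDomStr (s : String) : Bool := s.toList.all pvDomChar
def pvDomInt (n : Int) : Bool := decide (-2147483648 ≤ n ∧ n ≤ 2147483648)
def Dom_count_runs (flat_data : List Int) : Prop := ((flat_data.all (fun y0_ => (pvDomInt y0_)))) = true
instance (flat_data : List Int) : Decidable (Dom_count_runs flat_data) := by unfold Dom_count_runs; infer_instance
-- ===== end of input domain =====

-- B replaces A's incremental counters (k and the wrap-at-15 counter j) by a single pass
-- counting differing and equal adjacent pairs and the closed form 1 + d + e // 14 (simpler).

-- ===== PORT A =====
-- the for-loop with its `break` at the last index: recursion on index i with state (k, j);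
-- Python's two sequential ifs (rl != next: k+=1 / else j+=1; then j==15: k+=1, j=1) are
-- transcribed branch for branch, with `flat_data[i+1]` via pyGet? as in the source
def countRunsLoopA : List Int → Nat → Nat → Int → Int → Int
  | _, 0, _, k, _ => k                                   -- fuel exhausted (never reached: fuel = len(flat_data))
  | xs, fuel + 1, i, k, j =>
    if h : i < xs.length then
      if (i : Int) = (xs.length : Int) - 1 then k        -- break
      else
        if xs[i] ≠ (PySem.List.pyGet? xs ((i : Int) + 1)).getD 0 then
          (if j = 15 then countRunsLoopA xs fuel (i + 1) (k + 1 + 1) 1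
           else countRunsLoopA xs fuel (i + 1) (k + 1) j)
        else
          (if j + 1 = 15 then countRunsLoopA xs fuel (i + 1) (k + 1) 1
           else countRunsLoopA xs fuel (i + 1) k (j + 1))
    else k

def count_runs (flat_data : List Int) : Int :=
  countRunsLoopA flat_data flat_data.length 0 1 1

-- ===== PORT B =====
def count_runs_alt (flat_data : List Int) : Int :=
  let pairs := flat_data.zip flat_data.tail
  let d : Int := ((pairs.filter (fun p => p.1 ≠ p.2)).length : Int)
  let e : Int := ((pairs.filter (fun p => p.1 = p.2)).length : Int)
  1 + d + PySem.Int.floordiv e 14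

-- ===== PRECONDITION & SPEC =====
def Spec_count_runs (flat_data : List Int) (out : Int) : Prop := out = count_runs_alt flat_data
instance (flat_data : List Int) (out : Int) : Decidable (Spec_count_runs flat_data out) := by unfold Spec_count_runs; infer_instance

-- ===== CLAIM (what is proved, stated in full; the proofs are below) =====
def Claim_equal_count_runs : Prop := ∀ (flat_data : List Int), Dom_count_runs flat_data → Spec_count_runs flat_data (count_runs flat_data)

-- ===== LEMMAS AND PROOFS =====

-- pair counts (as naturals) over the zip of a list with its tail
def pvD (xs : List Int) : Nat := ((xs.zip xs.tail).filter (fun p => p.1 ≠ p.2)).length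
def pvE (xs : List Int) : Nat := ((xs.zip xs.tail).filter (fun p => p.1 = p.2)).length

theorem pvD_cons (a b : Int) (l : List Int) :
    pvD (a :: b :: l) = (if a ≠ b then 1 else 0) + pvD (b :: l) := by
  simp only [pvD, List.tail_cons, List.zip_cons_cons, List.filter]
  by_cases h : a = b <;> simp [h, Nat.add_comm]

theorem pvE_cons (a b : Int) (l : List Int) :
    pvE (a :: b :: l) = (if a = b then 1 else 0) + pvE (b :: l) := by
  simp only [pvE, List.tail_cons, List.zip_cons_cons, List.filter]
  by_cases h : a = b <;> simp [h, Nat.add_comm]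

theorem countRunsLoopA_invariant (xs : List Int) :
    ∀ (fuel i : Nat) (k : Int) (jn : Nat), xs.length - i ≤ fuel → i < xs.length → jn ≤ 13 →
    countRunsLoopA xs fuel i k ((jn : Int) + 1) =
      k + (pvD (xs.drop i) : Int) + (((pvE (xs.drop i) + jn) / 14 : Nat) : Int) := by
  intro fuel
  induction fuel with
  | zero => intro i k jn hn hi hj; omega
  | succ n ih =>
    intro i k jn hn hi hj
    rw [countRunsLoopA, dif_pos hi]
    by_cases hlast : (i : Int) = (xs.length : Int) - 1
    · rw [if_pos hlast]
      have hl : (xs.drop i).length = 1 := by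
        rw [List.length_drop]; omega
      obtain ⟨a, ha⟩ := List.length_eq_one_iff.mp hl
      have hdiv : jn / 14 = 0 := Nat.div_eq_of_lt (by omega)
      rw [ha]
      simp [pvD, pvE, hdiv]
    · rw [if_neg hlast]
      have hi1 : i + 1 < xs.length := by omega
      have hdrop : xs.drop i = xs[i] :: xs.drop (i + 1) := List.drop_eq_getElem_cons hi
      have hdrop1 : xs.drop (i + 1) = xs[i + 1] :: xs.drop (i + 2) :=
        List.drop_eq_getElem_cons hi1
      have hget : (PySem.List.pyGet? xs ((i : Int) + 1)).getD 0 = xs[i + 1] := by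
        have hc : ((i : Int) + 1) = ((i + 1 : Nat) : Int) := by push_cast; omega
        rw [hc, PySem.List.pyGet?_natCast, List.getElem?_eq_getElem hi1]
        rfl
      have hD : pvD (xs.drop i) = (if xs[i] ≠ xs[i + 1] then 1 else 0) + pvD (xs.drop (i + 1)) := by
        rw [hdrop, hdrop1, pvD_cons, ← hdrop1]
      have hE : pvE (xs.drop i) = (if xs[i] = xs[i + 1] then 1 else 0) + pvE (xs.drop (i + 1)) := by
        rw [hdrop, hdrop1, pvE_cons, ← hdrop1]
      rw [hget]
      by_cases heq : xs[i] = xs[i + 1]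
      · rw [if_neg (by omega : ¬ xs[i] ≠ xs[i + 1])]
        rw [hD, if_neg (by omega : ¬ xs[i] ≠ xs[i + 1]), hE, if_pos heq]
        by_cases hj13 : jn = 13
        · rw [if_pos (by rw [hj13]; norm_num : (jn : Int) + 1 + 1 = 15)]
          have hrec := ih (i + 1) (k + 1) 0 (by omega) hi1 (by omega)
          norm_num at hrec
          rw [hrec, hj13]
          have hdiv : (1 + pvE (xs.drop (i + 1)) + 13) / 14 = pvE (xs.drop (i + 1)) / 14 + 1 := by
            rw [show 1 + pvE (xs.drop (i + 1)) + 13 = pvE (xs.drop (i + 1)) + 14 by omega,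
              Nat.add_div_right _ (by norm_num)]
          rw [hdiv]
          push_cast
          omega
        · rw [if_neg (by omega : ¬ (jn : Int) + 1 + 1 = 15)]
          have hrec := ih (i + 1) k (jn + 1) (by omega) hi1 (by omega)
          rw [show ((jn : Int) + 1 + 1) = ((jn + 1 : Nat) : Int) + 1 by push_cast; omega, hrec]
          rw [show 1 + pvE (xs.drop (i + 1)) + jn = pvE (xs.drop (i + 1)) + (jn + 1) by omega]
          push_cast
          omega
      · rw [if_pos (by omega : xs[i] ≠ xs[i + 1])]
        rw [if_neg (by omega : ¬ (jn : Int) + 1 = 15)]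
        rw [hD, if_pos (by omega : xs[i] ≠ xs[i + 1]), hE, if_neg heq]
        rw [ih (i + 1) (k + 1) jn (by omega) hi1 hj]
        push_cast
        omega

theorem count_runs_spec : Claim_equal_count_runs := by
  unfold Claim_equal_count_runs
  intro xs _
  unfold Spec_count_runs count_runs count_runs_alt
  cases xs with
  | nil =>
    simp only [List.length_nil]
    rw [countRunsLoopA]
    norm_num [pvD, pvE, PySem.Int.floordiv]
  | cons a l =>
    have hlen : 0 < (a :: l).length := by simp
    have hinv := countRunsLoopA_invariant (a :: l) (a :: l).length 0 1 0 (by omega) hlen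
      (by norm_num)
    norm_num at hinv
    simp only [List.length_cons]
    rw [hinv]
    have hf : PySem.Int.floordiv ((pvE (a :: l) : Nat) : Int) 14
        = ((pvE (a :: l) / 14 : Nat) : Int) :=
      PySem.Int.floordiv_natCast (pvE (a :: l)) 14
    simp only [pvD, pvE] at *
    rw [hf]
    push_cast
    omega
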